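-- pv_equiv track=rewrite | github.com/jihunkeom/Seek2Skim | s2s/third_party/models/seek2skim_faster_eval.py | compute_encoder_macs
-- ===== SOURCE A (Python) =====
-- def compute_encoder_macs(sentence_lengths, dim, skim=False):
--     def _layer_mac(seq_len, dim):
--         mac = 2 * dim * (seq_len ** 2)
--         mac += 12 * (dim ** 2) * seq_len
--         return mac
--
--     def _skim_mac(seq_len, dim):
--         # skim_mac = (dim * (dim // 2) * seq_len) + ((dim // 2) * 2 * seq_len)
--         skim_mac = (dim * dim * seq_len) + (dim * 2 * seq_len)
--         return skim_mac
--
--     mac = 0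
--     for i in range(len(sentence_lengths)):
--         seq_len = sentence_lengths[i]
--         mac += _layer_mac(seq_len, dim)
--         if skim and i < len(sentence_lengths)-1:
--             mac += _skim_mac(seq_len, dim)
--
--     return mac
-- ===== SOURCE B (Python) =====
-- def compute_encoder_macs(sentence_lengths, dim, skim=False):
--     # Frequency-table algorithm: evaluate the per-layer cost once per DISTINCT
--     # sentence length, weighted by its multiplicity; the skim cost applies to
--     # every sentence except the last, so add it for all and subtract the last.
--     counts = {}
--     for x in sentence_lengths:
--         counts[x] = counts.get(x, 0) + 1
--     total = 0
--     for v, c in counts.items():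
--         per_layer = 2 * dim * v * v + 12 * dim * dim * v
--         if skim:
--             per_layer += (dim * dim + 2 * dim) * v
--         total += c * per_layer
--     if skim and sentence_lengths:
--         total -= (dim * dim + 2 * dim) * sentence_lengths[-1]
--     return total
-- ===== Notes on version B (the rewrite author's own statement) =====
-- stated objective: alternative
-- what changed: Replaced the per-index accumulation with a frequency-table algorithm: build a dict counting each distinct sentence length once, sum cost-per-distinct-length times multiplicity, and correct the skim term by subtracting the last sentence's skim cost instead of testing the index on every iteration.
import Mathlib
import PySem

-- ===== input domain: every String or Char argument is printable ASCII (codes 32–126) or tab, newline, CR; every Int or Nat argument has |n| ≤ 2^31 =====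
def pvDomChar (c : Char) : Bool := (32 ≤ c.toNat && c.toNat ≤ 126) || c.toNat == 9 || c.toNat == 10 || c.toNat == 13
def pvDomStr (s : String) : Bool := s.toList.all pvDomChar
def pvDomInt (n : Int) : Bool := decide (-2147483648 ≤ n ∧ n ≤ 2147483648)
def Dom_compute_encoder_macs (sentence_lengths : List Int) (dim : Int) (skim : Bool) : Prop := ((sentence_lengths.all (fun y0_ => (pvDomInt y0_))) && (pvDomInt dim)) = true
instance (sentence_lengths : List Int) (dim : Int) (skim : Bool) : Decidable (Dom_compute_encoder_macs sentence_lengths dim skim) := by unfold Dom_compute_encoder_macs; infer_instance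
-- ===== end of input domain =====

-- ===== PORT A =====
-- B replaces the per-index loop by a frequency table over distinct sentence lengths
-- plus a last-element correction for the skim term (alternative algorithm, same cost).
def layer_mac (seq_len dim : Int) : Int :=
  2 * dim * seq_len ^ 2 + 12 * dim ^ 2 * seq_len

def skim_mac (seq_len dim : Int) : Int :=
  dim * dim * seq_len + dim * 2 * seq_len

def compute_encoder_macs (sentence_lengths : List Int) (dim : Int) (skim : Bool) : Int :=
  (PySem.List.pyRange 0 (sentence_lengths.length : Int) 1).foldl
    (fun mac i =>
      let seq_len := PySem.List.pyGetD sentence_lengths i 0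
      let mac := mac + layer_mac seq_len dim
      if skim && decide (i < (sentence_lengths.length : Int) - 1) then
        mac + skim_mac seq_len dim
      else mac) 0

-- ===== PORT B =====
def compute_encoder_macs_alt (sentence_lengths : List Int) (dim : Int) (skim : Bool) : Int :=
  let counts : PySem.Dict Int Int :=
    sentence_lengths.foldl (fun d x => d.insert x (d.getD x 0 + 1)) PySem.Dict.empty
  let total := counts.items.foldl (fun total p =>
    let per_layer := 2 * dim * p.1 * p.1 + 12 * dim * dim * p.1
    let per_layer := if skim then per_layer + (dim * dim + 2 * dim) * p.1 else per_layer
    total + p.2 * per_layer) 0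
  if skim && !sentence_lengths.isEmpty then
    total - (dim * dim + 2 * dim) * PySem.List.pyGetD sentence_lengths (-1) 0
  else total

-- ===== PRECONDITION & SPEC =====
def Spec_compute_encoder_macs (sentence_lengths : List Int) (dim : Int) (skim : Bool) (out : Int) : Prop := out = compute_encoder_macs_alt sentence_lengths dim skim
instance (sentence_lengths : List Int) (dim : Int) (skim : Bool) (out : Int) : Decidable (Spec_compute_encoder_macs sentence_lengths dim skim out) := by unfold Spec_compute_encoder_macs; infer_instance

-- ===== CLAIM =====
def Claim_equal_compute_encoder_macs : Prop := ∀ (sentence_lengths : List Int) (dim : Int) (skim : Bool), Dom_compute_encoder_macs sentence_lengths dim skim → Spec_compute_encoder_macs sentence_lengths dim skim (compute_encoder_macs sentence_lengths dim skim)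

-- ===== LEMMAS AND PROOFS =====
-- Characterisation of A's index loop as aggregate sums over the suffix from index a.
lemma loopA_char (dim : Int) (skim : Bool) :
    ∀ (n : Nat) (xs : List Int) (a : Nat), xs.length - a = n → ∀ (acc : Int),
    (PySem.List.pyRange (a : Int) (xs.length : Int) 1).foldl
      (fun mac i =>
        let seq_len := PySem.List.pyGetD xs i 0
        let mac := mac + layer_mac seq_len dim
        if skim && decide (i < (xs.length : Int) - 1) then
          mac + skim_mac seq_len dim
        else mac) acc
      = acc + 2 * dim * ((xs.drop a).map (fun x => x * x)).sum
          + 12 * dim ^ 2 * (xs.drop a).sum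
          + (if skim then (dim * dim + 2 * dim) * (xs.drop a).dropLast.sum else 0) := by
  intro n
  induction n with
  | zero =>
      intro xs a h acc
      have hle : xs.length ≤ a := by omega
      rw [PySem.List.pyRange_one_eq_nil (by exact_mod_cast hle)]
      simp [List.drop_eq_nil_of_le hle]
  | succ n ih =>
      intro xs a h acc
      have hlt : a < xs.length := by omega
      rw [PySem.List.pyRange_one_cons (by exact_mod_cast hlt)]
      rw [List.foldl_cons]
      have hget : PySem.List.pyGetD xs (a : Int) 0 = xs[a] := by
        rw [PySem.List.pyGetD_natCast]
        exact List.getD_eq_getElem xs 0 hlt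
      have hcast : ((a : Int) + 1) = ((a + 1 : Nat) : Int) := by push_cast; ring
      have hdrop : xs.drop a = xs[a] :: xs.drop (a + 1) := List.drop_eq_getElem_cons hlt
      rw [hcast, ih xs (a + 1) (by omega)]
      have hsum : (xs.drop a).sum = xs[a] + (xs.drop (a + 1)).sum := by
        rw [hdrop, List.sum_cons]
      have hsq : ((xs.drop a).map (fun x => x * x)).sum
          = xs[a] * xs[a] + ((xs.drop (a + 1)).map (fun x => x * x)).sum := by
        rw [hdrop, List.map_cons, List.sum_cons]
      by_cases hs : skim = true
      · subst hs
        by_cases hlast : a + 1 < xs.length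
        · have hcond : (true && decide ((a : Int) < (xs.length : Int) - 1)) = true := by
            simp; omega
          have hne : xs.drop (a + 1) ≠ [] := by
            simp [List.drop_eq_nil_iff]; omega
          have hdl : (xs.drop a).dropLast.sum = xs[a] + (xs.drop (a + 1)).dropLast.sum := by
            rw [hdrop, List.dropLast_cons_of_ne_nil hne, List.sum_cons]
          rw [hsum, hsq, hdl]
          simp [hcond, layer_mac, skim_mac, hget]
          ring
        · have hcond : (true && decide ((a : Int) < (xs.length : Int) - 1)) = false := by
            simp; omega
          have hnil : xs.drop (a + 1) = [] := List.drop_eq_nil_of_le (by omega)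
          have hdl : (xs.drop a).dropLast.sum = 0 := by
            rw [hdrop, hnil]; simp
          rw [hsum, hsq, hdl]
          simp [hcond, layer_mac, hget, hnil]
          ring
      · have hsf : skim = false := by simpa using hs
        subst hsf
        rw [hsum, hsq]
        simp [layer_mac, hget]
        ring

-- Summing a function weighted by multiplicities over any nodup list of xs's members
-- equals summing it directly over xs.
lemma sum_count_mul (xs S : List Int) (hS : S.Nodup) (hm : ∀ k, k ∈ S ↔ k ∈ xs) (f : Int → Int) :
    (S.map (fun k => (xs.count k : Int) * f k)).sum = (xs.map f).sum := by
  have h1 : (S.map (fun k => (xs.count k : Int) * f k)).sum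
      = S.toFinset.sum (fun k => (xs.count k : Int) * f k) :=
    (List.sum_toFinset _ hS).symm
  have hfs : S.toFinset = xs.toFinset := by
    ext k; simp [hm k]
  have h2 : ((xs : Multiset Int).map f).sum
      = ∑ a ∈ (xs : Multiset Int).toFinset, (xs : Multiset Int).count a • f a :=
    Finset.sum_multiset_map_count _ _
  simp only [Multiset.map_coe, Multiset.sum_coe, Multiset.coe_count] at h2
  rw [h1, hfs, h2]
  apply Finset.sum_congr rfl
  intro k _
  simp

-- B's item loop computes the weighted sum of the per-layer cost over distinct lengths,
-- which equals the direct sum over the whole list.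
lemma altB_items (xs : List Int) (dim : Int) (skim : Bool) :
    ((PySem.Dict.counter xs).items.foldl (fun total p =>
      total + p.2 * (if skim then 2 * dim * p.1 * p.1 + 12 * dim * dim * p.1
                              + (dim * dim + 2 * dim) * p.1
                     else 2 * dim * p.1 * p.1 + 12 * dim * dim * p.1)) 0)
    = 2 * dim * (xs.map (fun x => x * x)).sum + 12 * dim ^ 2 * xs.sum
      + (if skim then (dim * dim + 2 * dim) * xs.sum else 0) := by
  rw [PySem.List.foldl_add, PySem.Dict.items_counter, List.map_map]
  have := sum_count_mul xs (PySem.Set.ofList xs) (PySem.Set.nodup_ofList xs)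
    (fun k => PySem.Set.mem_ofList xs k) (fun k =>
      if skim then 2 * dim * k * k + 12 * dim * dim * k + (dim * dim + 2 * dim) * k
      else 2 * dim * k * k + 12 * dim * dim * k)
  rw [show ((fun p : Int × Int => p.2 * (if skim then 2 * dim * p.1 * p.1 + 12 * dim * dim * p.1
          + (dim * dim + 2 * dim) * p.1 else 2 * dim * p.1 * p.1 + 12 * dim * dim * p.1))
        ∘ fun k => (k, (xs.count k : Int)))
      = fun k => (xs.count k : Int) * (if skim then 2 * dim * k * k + 12 * dim * dim * k
          + (dim * dim + 2 * dim) * k else 2 * dim * k * k + 12 * dim * dim * k) from rfl]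
  rw [this]
  cases skim
  · simp only [Bool.false_eq_true, if_false]
    rw [show (fun k : Int => 2 * dim * k * k + 12 * dim * dim * k)
        = fun k : Int => (2 * dim) * (k * k) + (12 * dim * dim) * k from by funext k; ring]
    rw [PySem.List.sum_map_add_int, List.sum_map_mul_left, List.sum_map_mul_left]
    simp only [List.map_id']
    ring
  · simp only [if_true]
    rw [show (fun k : Int => 2 * dim * k * k + 12 * dim * dim * k + (dim * dim + 2 * dim) * k)
        = fun k : Int => (2 * dim) * (k * k) + (12 * dim * dim + (dim * dim + 2 * dim)) * k from by
      funext k; ring]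
    rw [PySem.List.sum_map_add_int, List.sum_map_mul_left, List.sum_map_mul_left]
    simp only [List.map_id']
    ring

lemma pyGetD_neg_one_concat (ys : List Int) (z : Int) :
    PySem.List.pyGetD (ys ++ [z]) (-1) 0 = z := by
  simp [PySem.List.pyGetD, PySem.List.pyGet?, PySem.List.pyIdx?]

-- ===== VERDICT =====
theorem compute_encoder_macs_spec : Claim_equal_compute_encoder_macs := by
  intro sl dim skim _
  unfold Spec_compute_encoder_macs compute_encoder_macs compute_encoder_macs_alt
  have hA := loopA_char dim skim sl.length sl 0 (by omega) 0
  simp only [Nat.cast_zero, List.drop_zero] at hA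
  rw [hA]
  simp only [PySem.Dict.foldl_insert_getD_add_one_eq_counter]
  rw [altB_items]
  cases skim
  · simp [mul_comm]
  · simp only [Bool.true_and, if_true]
    rcases List.eq_nil_or_concat sl with hnil | ⟨ys, z, hconc⟩
    · subst hnil; simp
    · subst hconc
      simp only [List.concat_eq_append]
      have hne : (ys ++ [z]).isEmpty = false := by simp
      rw [pyGetD_neg_one_concat]
      simp [hne]
      ring
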